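-- pv_equiv track=rewrite | github.com/Macedoni0/ejercicios_nivel_0 | ejercicios_nivel_1/ordenar_numeros.py | ordena_positivos
-- ===== SOURCE A (Python) =====
-- def ordena_positivos(lista):
--     positivos_ordenados = sorted([num for num in lista if num > 0])
--     resultado = []
--     indice_positivos = 0
--
--     for num in lista:
--         if num > 0:
--             resultado.append(positivos_ordenados[indice_positivos])
--             indice_positivos += 1
--         else:
--             resultado.append(num)
--
--     return resultado
-- ===== SOURCE B (Python) =====
-- def ordena_positivos(lista):
--     pendientes = [num for num in lista if num > 0]
--     resultado = []
--     for num in lista: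
--         if num > 0:
--             m = min(pendientes)
--             pendientes.remove(m)
--             resultado.append(m)
--         else:
--             resultado.append(num)
--     return resultado
-- ===== Notes on version B (the rewrite author's own statement) =====
-- stated objective: alternative
-- what changed: B never sorts: it keeps the multiset of positive values and, at each positive slot, extracts the minimum remaining value (selection / repeated min-extraction), whereas A sorts the positives once and fills them in with a running counter.
import Mathlib
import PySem

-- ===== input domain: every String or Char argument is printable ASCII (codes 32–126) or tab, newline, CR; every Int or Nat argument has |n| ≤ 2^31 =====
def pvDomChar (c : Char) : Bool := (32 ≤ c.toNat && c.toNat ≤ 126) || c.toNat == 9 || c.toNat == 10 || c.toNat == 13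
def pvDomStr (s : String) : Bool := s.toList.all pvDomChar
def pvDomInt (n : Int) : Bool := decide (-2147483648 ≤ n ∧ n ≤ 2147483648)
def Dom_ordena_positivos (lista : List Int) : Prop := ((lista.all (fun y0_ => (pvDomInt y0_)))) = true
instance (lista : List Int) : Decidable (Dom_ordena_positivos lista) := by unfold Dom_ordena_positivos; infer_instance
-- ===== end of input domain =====

-- B replaces A's library sort + running counter by repeated minimum extraction from the
-- multiset of positives (selection, no sort) — alternative algorithm, not faster.


-- ===== PORT A =====
-- positivos_ordenados[indice_positivos]: the counter stays below the number of positives,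
-- so the Python indexing never raises; ported with pyGetD (default never used).
def ordena_positivos (lista : List Int) : List Int :=
  let positivos_ordenados :=
    PySem.List.sorted (lista.filter (fun num => decide (num > 0))) (fun x => x) false
  let st := lista.foldl
    (fun (st : List Int × Int) num =>
      if num > 0 then
        (st.1 ++ [PySem.List.pyGetD positivos_ordenados st.2 0], st.2 + 1)
      else
        (st.1 ++ [num], st.2))
    ([], 0)
  st.1

-- ===== PORT B =====
-- min(pendientes) and pendientes.remove(m): whenever num > 0 the pendientes list is
-- nonempty and contains m, so Python never raises; ported with min?/remove? plus a
-- default that is never used.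
def ordena_positivos_alt (lista : List Int) : List Int :=
  let st := lista.foldl
    (fun (st : List Int × List Int) num =>   -- (pendientes, resultado)
      if num > 0 then
        let m := (PySem.List.min? st.1 (fun x => x)).getD 0
        ((PySem.List.remove? st.1 m).getD st.1, st.2 ++ [m])
      else
        (st.1, st.2 ++ [num]))
    (lista.filter (fun num => decide (num > 0)), [])
  st.2

-- ===== PRECONDITION & SPEC =====
def Spec_ordena_positivos (lista : List Int) (out : List Int) : Prop := out = ordena_positivos_alt lista
instance (lista : List Int) (out : List Int) : Decidable (Spec_ordena_positivos lista out) := by unfold Spec_ordena_positivos; infer_instance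

-- ===== CLAIM (what is proved, stated in full; the proofs are below) =====
def Claim_equal_ordena_positivos : Prop := ∀ (lista : List Int), Dom_ordena_positivos lista → Spec_ordena_positivos lista (ordena_positivos lista)

-- ===== LEMMAS AND PROOFS =====

-- Canonical form both ports reduce to: walk the list, replacing successive positives
-- by successive elements of s.
def pvMerge : List Int → List Int → List Int
  | [], _ => []
  | x :: xs, s => if x > 0 then (s[0]?.getD 0) :: pvMerge xs s.tail else x :: pvMerge xs s

-- Repeated min-extraction as a standalone function (what B's loop performs on pendientes).
def pvSel (p : List Int) : List Int :=
  match h : PySem.List.min? p (fun x => x) with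
  | none => []
  | some m => m :: pvSel (p.erase m)   -- h names the match scrutinee for termination
termination_by p.length
decreasing_by
  have hm : m ∈ p := PySem.List.min?_mem h
  have := List.length_erase_of_mem hm
  have : 0 < p.length := List.length_pos_of_mem hm
  omega

theorem pvSel_cons {p : List Int} {m : Int}
    (h : PySem.List.min? p (fun x => x) = some m) :
    pvSel p = m :: pvSel (p.erase m) := by
  rw [pvSel]
  split
  · next h' => rw [h'] at h; cases h
  · next m' h' => rw [h'] at h; cases h; rfl

theorem pvSel_nil : pvSel [] = [] := by
  rw [pvSel]
  split
  · rfl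
  · next m h => exact absurd (PySem.List.min?_mem h) (List.not_mem_nil)

theorem pvSel_perm (p : List Int) : (pvSel p).Perm p := by
  induction p using pvSel.induct with
  | case1 p h =>
    obtain rfl := (PySem.List.min?_eq_none_iff p (fun x => x)).mp h
    rw [pvSel_nil]
  | case2 p m h ih =>
    rw [pvSel_cons h]
    exact ((ih.cons m).trans (List.perm_cons_erase (PySem.List.min?_mem h)).symm)

theorem pvSel_pairwise (p : List Int) : (pvSel p).Pairwise (· ≤ ·) := by
  induction p using pvSel.induct with
  | case1 p h =>
    obtain rfl := (PySem.List.min?_eq_none_iff p (fun x => x)).mp h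
    rw [pvSel_nil]; exact List.Pairwise.nil
  | case2 p m h ih =>
    rw [pvSel_cons h]
    refine List.Pairwise.cons (fun b hb => ?_) ih
    have hbp : b ∈ p.erase m := ((pvSel_perm _).mem_iff).mp hb
    exact PySem.List.min?_isMin h b (List.mem_of_mem_erase hbp)

theorem pvSel_eq_sorted (p : List Int) :
    PySem.List.sorted p (fun x => x) false = pvSel p :=
  PySem.List.sorted_id_eq_of_perm_of_pairwise p (pvSel p) (pvSel_perm p) (pvSel_pairwise p)

theorem pvLoopA (s : List Int) : ∀ (xs : List Int) (k : Nat) (acc : List Int),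
    (xs.foldl
      (fun (st : List Int × Int) num =>
        if num > 0 then
          (st.1 ++ [PySem.List.pyGetD s st.2 0], st.2 + 1)
        else
          (st.1 ++ [num], st.2))
      (acc, (k : Int))).1 = acc ++ pvMerge xs (s.drop k) := by
  intro xs
  induction xs with
  | nil => intro k acc; simp [pvMerge]
  | cons x xs ih =>
    intro k acc
    by_cases hx : x > 0
    · have hk1 : (k : Int) + 1 = ((k + 1 : Nat) : Int) := by push_cast; ring
      simp only [List.foldl_cons, if_pos hx, hk1, ih (k + 1) _]
      simp [pvMerge, if_pos hx, List.tail_drop, List.getElem?_drop,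
        List.getD_eq_getElem?_getD]
    · simp only [List.foldl_cons, if_neg hx, ih k _]
      simp [pvMerge, if_neg hx]

theorem pvLoopB : ∀ (xs : List Int) (p acc : List Int),
    (xs.filter (fun num => decide (num > 0))).length ≤ p.length →
    (xs.foldl
      (fun (st : List Int × List Int) num =>
        if num > 0 then
          let m := (PySem.List.min? st.1 (fun x => x)).getD 0
          ((PySem.List.remove? st.1 m).getD st.1, st.2 ++ [m])
        else
          (st.1, st.2 ++ [num]))
      (p, acc)).2 = acc ++ pvMerge xs (pvSel p) := by
  intro xs
  induction xs with
  | nil => intro p acc _; simp [pvMerge]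
  | cons x xs ih =>
    intro p acc hlen
    by_cases hx : x > 0
    · have hp : p ≠ [] := by
        rintro rfl; simp [hx] at hlen
      obtain ⟨m, hm⟩ := Option.ne_none_iff_exists'.mp
        (fun hnone => hp ((PySem.List.min?_eq_none_iff p (fun x => x)).mp hnone))
      have hmem : m ∈ p := PySem.List.min?_mem hm
      have hrem : PySem.List.remove? p m = some (p.erase m) :=
        PySem.List.remove?_eq_some_erase p m hmem
      have hlen' : (xs.filter (fun num => decide (num > 0))).length ≤ (p.erase m).length := by
        have := List.length_erase_of_mem hmem
        simp [hx] at hlen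
        simp only [gt_iff_lt]
        omega
      simp only [List.foldl_cons, if_pos hx, hm, hrem, Option.getD_some]
      rw [ih (p.erase m) _ hlen']
      simp [pvMerge, if_pos hx, pvSel_cons hm]
    · have hlen' : (xs.filter (fun num => decide (num > 0))).length ≤ p.length := by
        simpa [hx] using hlen
      simp only [List.foldl_cons, if_neg hx]
      rw [ih p _ hlen']
      simp [pvMerge, if_neg hx]

theorem pvA_eq (lista : List Int) :
    ordena_positivos lista
      = pvMerge lista (PySem.List.sorted (lista.filter (fun num => decide (num > 0))) (fun x => x) false) := by
  unfold ordena_positivos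
  simpa using pvLoopA _ lista 0 []

theorem pvB_eq (lista : List Int) :
    ordena_positivos_alt lista
      = pvMerge lista (pvSel (lista.filter (fun num => decide (num > 0)))) := by
  unfold ordena_positivos_alt
  exact pvLoopB lista _ [] le_rfl

-- ===== VERDICT (by name: the statement is the Claim_ definition above) =====
theorem ordena_positivos_spec : Claim_equal_ordena_positivos := by
  intro lista _
  unfold Spec_ordena_positivos
  rw [pvA_eq, pvB_eq, pvSel_eq_sorted]
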